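-- pv_equiv track=rewrite | github.com/zisserj/advent_of_code_25 | day_02.py | sym_in_range
-- ===== SOURCE A (Python) =====
-- def make_num(p, num_of_sections, w):
--     num = 0
--     for i in range(num_of_sections):
--         num += p * (10**(i*w))
--     return num
--
-- def sym_in_range(digits, start, end):
--     sym_set = set()
--     for i in range(2, digits+1): # i = num of sections
--         if digits % i == 0:
--             width = digits // i
--             sec = start // 10**(digits-width)
--             num = make_num(sec, i, width)
--             while sec < 10**(width+1) and num <= end:
--                 if num >= start:
--                     sym_set.add(num)
--                 sec += 1
--                 num = make_num(sec, i, width)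
--     return sum(i for i in sym_set)
-- ===== SOURCE B (Python) =====
-- def sym_in_range(digits, start, end):
--     total = 0
--     prev = []  # (rep, lo, hi) of the section-counts already processed
--     for i in range(2, digits + 1):  # i = num of sections
--         if digits % i == 0:
--             width = digits // i
--             rep = (10 ** digits - 1) // (10 ** width - 1)  # 0b1 repeated i times in width-blocks
--             lo = max(start // 10 ** (digits - width), -(-start // rep))
--             hi = min(10 ** (width + 1) - 1, end // rep)
--             for sec in range(lo, hi + 1):
--                 num = sec * rep
--                 if not any(num % r == 0 and l <= num // r <= h for (r, l, h) in prev):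
--                     total += num
--             prev.append((rep, lo, hi))
--     return total
-- ===== Notes on version B (the rewrite author's own statement) =====
-- stated objective: faster
-- what changed: B drops A's set entirely: per divisor it computes the repeated-block factor by a closed-form geometric-series quotient and the valid section interval by floor/ceil-division bounds, sums the new numbers directly, and deduplicates with an O(1) arithmetic divisibility test against earlier divisors instead of A's per-candidate make_num loop, linear scan-and-filter over sections and hash set.
import Mathlib
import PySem

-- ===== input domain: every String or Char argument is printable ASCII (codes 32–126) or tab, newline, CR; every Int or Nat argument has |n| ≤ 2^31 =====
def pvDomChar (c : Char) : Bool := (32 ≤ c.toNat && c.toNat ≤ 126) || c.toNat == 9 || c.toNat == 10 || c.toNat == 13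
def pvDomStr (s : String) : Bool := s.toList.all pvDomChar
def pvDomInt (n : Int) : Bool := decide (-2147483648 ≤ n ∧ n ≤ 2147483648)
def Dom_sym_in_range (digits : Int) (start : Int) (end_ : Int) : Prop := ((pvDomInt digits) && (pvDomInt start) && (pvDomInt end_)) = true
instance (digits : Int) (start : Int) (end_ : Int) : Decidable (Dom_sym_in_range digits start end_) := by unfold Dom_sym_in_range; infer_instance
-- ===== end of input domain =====

-- B replaces A's per-candidate make_num loop and linear scan-and-filter by a closed-form
-- geometric-series factor and arithmetic interval bounds per divisor (objective: faster, constant factor).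

-- ===== PORT A =====
-- Exponents i*w, digits-width and width+1 are ≥ 0 at every call A makes (i ≥ 0, width ≥ 1),
-- so `.toNat` on them is exact there.
def make_num (p : Int) (num_of_sections : Int) (w : Int) : Int :=
  (PySem.List.pyRange 0 num_of_sections 1).foldl (fun num i => num + p * 10 ^ (i * w).toNat) 0

-- A's `while sec < 10**(width+1) and num <= end:` loop, state (sec, num, sym_set)
def symWhile (i : Int) (width : Int) (start : Int) (end_ : Int)
    (sec : Int) (num : Int) (s : PySem.Set Int) : PySem.Set Int :=
  if h : sec < 10 ^ (width + 1).toNat ∧ num ≤ end_ then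
    symWhile i width start end_ (sec + 1) (make_num (sec + 1) i width)
      (if start ≤ num then PySem.Set.add s num else s)
  else s
termination_by (10 ^ (width + 1).toNat - sec).toNat
decreasing_by
  have := h.1
  omega

def sym_in_range (digits : Int) (start : Int) (end_ : Int) : Int :=
  let sym_set : PySem.Set Int :=
    (PySem.List.pyRange 2 (digits + 1) 1).foldl (fun s i =>
      if PySem.Int.mod digits i = 0 then
        let width := PySem.Int.floordiv digits i
        let sec := PySem.Int.floordiv start (10 ^ (digits - width).toNat)
        symWhile i width start end_ sec (make_num sec i width) s
      else s) PySem.Set.empty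
  sym_set.sum

-- ===== PORT B =====
def sym_in_range_alt (digits : Int) (start : Int) (end_ : Int) : Int :=
  let st :=
    (PySem.List.pyRange 2 (digits + 1) 1).foldl (fun st i =>
      if PySem.Int.mod digits i = 0 then
        let width := PySem.Int.floordiv digits i
        let rep := PySem.Int.floordiv (10 ^ digits.toNat - 1) (10 ^ width.toNat - 1)
        let lo := max (PySem.Int.floordiv start (10 ^ (digits - width).toNat))
                      (-(PySem.Int.floordiv (-start) rep))
        let hi := min (10 ^ (width + 1).toNat - 1) (PySem.Int.floordiv end_ rep)
        let total := (PySem.List.pyRange lo (hi + 1) 1).foldl (fun t sec =>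
          let num := sec * rep
          if !(st.2.any (fun p => decide (PySem.Int.mod num p.1 = 0) &&
                decide (p.2.1 ≤ PySem.Int.floordiv num p.1) &&
                decide (PySem.Int.floordiv num p.1 ≤ p.2.2))) then t + num else t) st.1
        (total, st.2 ++ [(rep, lo, hi)])
      else st) ((0 : Int), ([] : List (Int × Int × Int)))
  st.1

-- ===== PRECONDITION & SPEC =====
def Spec_sym_in_range (digits : Int) (start : Int) (end_ : Int) (out : Int) : Prop := out = sym_in_range_alt digits start end_
instance (digits : Int) (start : Int) (end_ : Int) (out : Int) : Decidable (Spec_sym_in_range digits start end_ out) := by unfold Spec_sym_in_range; infer_instance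

-- ===== CLAIM (what is proved, stated in full; the proofs are below) =====
def Claim_equal_sym_in_range : Prop := ∀ (digits : Int) (start : Int) (end_ : Int), Dom_sym_in_range digits start end_ → Spec_sym_in_range digits start end_ (sym_in_range digits start end_)

-- ===== LEMMAS AND PROOFS =====

-- geometric sum over List.range
lemma list_geom_mul (x : Int) (n : Nat) :
    ((List.range n).map (fun k => x ^ k)).sum * (x - 1) = x ^ n - 1 := by
  induction n with
  | zero => simp
  | succ n ih =>
    rw [List.range_succ, List.map_append, List.sum_append]
    simp only [List.map_cons, List.map_nil, List.sum_cons, List.sum_nil]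
    rw [add_mul, ih, pow_succ]
    ring

-- make_num is multiplication by the repunit factor Σ_{k<n} (10^w)^k
lemma make_num_eq (p n w : Int) (hw : 0 ≤ w) :
    make_num p n w = p * ((List.range n.toNat).map (fun k => (10 ^ w.toNat) ^ k)).sum := by
  obtain ⟨m, rfl⟩ := Int.eq_ofNat_of_zero_le hw
  unfold make_num
  rw [PySem.List.pyRange_one]
  simp only [Int.sub_zero, List.foldl_map]
  rw [PySem.List.foldl_add]
  have h10 : ∀ k : Nat, (10:Int) ^ (((k:Int)) * (m:Int)).toNat = ((10:Int) ^ m) ^ k := by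
    intro k
    have : (((k:Int)) * (m:Int)).toNat = m * k := by
      rw [mul_comm, ← Int.natCast_mul, Int.toNat_natCast]
    rw [this, pow_mul]
  simp only [Int.toNat_natCast, zero_add, h10]
  rw [← List.sum_map_mul_left]

lemma rep_pos (i : Nat) (x : Int) (hx : 1 ≤ x) (hi : 1 ≤ i) :
    0 < ((List.range i).map (fun k => x ^ k)).sum := by
  apply List.sum_pos
  · intro y hy
    simp only [List.mem_map] at hy
    obtain ⟨k, _, rfl⟩ := hy
    positivity
  · simp
    omega

-- B's closed-form rep equals the repunit factor
lemma rep_eq (d w i : Int) (hw : 1 ≤ w) (hi : 2 ≤ i) (hiw : i * w = d) :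
    PySem.Int.floordiv (10 ^ d.toNat - 1) (10 ^ w.toNat - 1)
      = ((List.range i.toNat).map (fun k => (10 ^ w.toNat) ^ k)).sum := by
  have hx : (1:Int) < 10 ^ w.toNat := by
    have : (10:Int) ^ 1 ≤ 10 ^ w.toNat := pow_le_pow_right₀ (by norm_num) (by omega)
    simpa using lt_of_lt_of_le (by norm_num) this
  have hd : d.toNat = w.toNat * i.toNat := by
    have h1 : 0 ≤ i := by omega
    have h2 : 0 ≤ w := by omega
    subst hiw
    rw [mul_comm, ← Int.toNat_mul h2 h1]
  have hgeo := list_geom_mul (10 ^ w.toNat) i.toNat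
  rw [PySem.Int.floordiv_eq_ediv_of_pos (by omega)]
  have : (10:Int) ^ d.toNat - 1 = ((List.range i.toNat).map (fun k => ((10:Int) ^ w.toNat) ^ k)).sum * (10 ^ w.toNat - 1) := by
    rw [hgeo, hd, pow_mul]
  rw [this, Int.mul_ediv_cancel _ (by omega)]

-- A's while loop collects exactly the arithmetic interval of sections B enumerates
lemma symWhile_spec (i width start end_ R : Int) (hR : 0 < R)
    (hmk : ∀ p : Int, make_num p i width = p * R) :
    ∀ (n : Nat) (sec : Int) (s : PySem.Set Int),
      (10 ^ (width + 1).toNat - sec).toNat = n →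
      symWhile i width start end_ sec (make_num sec i width) s
        = ((PySem.List.pyRange (max sec (-(PySem.Int.floordiv (-start) R)))
              (min (10 ^ (width + 1).toNat - 1) (PySem.Int.floordiv end_ R) + 1) 1).map
            (fun sec => sec * R)).foldl PySem.Set.add s := by
  intro n
  induction n using Nat.strong_induction_on with
  | _ n ih =>
    intro sec s hn
    set X : Int := 10 ^ (width + 1).toNat with hX
    set lo : Int := -(PySem.Int.floordiv (-start) R) with hlo
    set hiE : Int := PySem.Int.floordiv end_ R with hhiE
    have hbr1 : ∀ q : Int, q ≤ hiE ↔ q * R ≤ end_ := fun q =>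
      PySem.Int.le_floordiv_iff_mul_le hR
    have hbr2 : ∀ q : Int, lo ≤ q ↔ start ≤ q * R := by
      intro q
      rw [hlo, neg_le, PySem.Int.le_floordiv_iff_mul_le hR, neg_mul, neg_le_neg_iff]
    rw [hmk, symWhile]
    by_cases hc : sec < X ∧ sec * R ≤ end_
    · rw [dif_pos hc]
      have hsechiE : sec ≤ hiE := (hbr1 sec).mpr hc.2
      have hstep : (X - (sec + 1)).toNat = n - 1 ∧ 1 ≤ n := by
        constructor <;> omega
      by_cases hin : start ≤ sec * R
      · have hlosec : lo ≤ sec := (hbr2 sec).mpr hin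
        rw [if_pos hin]
        rw [ih (n-1) (by omega) (sec+1) _ hstep.1]
        have h1 : max sec lo = sec := max_eq_left hlosec
        have h2 : max (sec+1) lo = sec + 1 := max_eq_left (by omega)
        rw [h1, h2]
        conv_rhs => rw [PySem.List.pyRange_one_cons (show sec < min (X-1) hiE + 1 by omega)]
        simp only [List.map_cons, List.foldl_cons]
      · have hlosec : sec < lo := by
          by_contra h
          exact hin ((hbr2 sec).mp (by omega))
        rw [if_neg hin]
        rw [ih (n-1) (by omega) (sec+1) _ hstep.1]
        have h1 : max sec lo = lo := max_eq_right (by omega)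
        have h2 : max (sec+1) lo = lo := max_eq_right (by omega)
        rw [h1, h2]
    · rw [dif_neg hc]
      have : min (X - 1) hiE + 1 ≤ max sec lo := by
        rcases not_and_or.mp hc with h | h
        · omega
        · have : hiE < sec := by
            by_contra h2
            exact h ((hbr1 sec).mp (by omega))
          omega
      rw [PySem.List.pyRange_one_eq_nil this]
      simp

lemma divisor_facts (d i : Int) (h2 : 2 ≤ i) (hid : i ≤ d)
    (hmod : PySem.Int.mod d i = 0) :
    1 ≤ PySem.Int.floordiv d i ∧ i * PySem.Int.floordiv d i = d := by
  have hipos : (0:Int) < i := by omega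
  rw [PySem.Int.mod_eq_emod_of_pos hipos] at hmod
  have hdvd : i ∣ d := Int.dvd_of_emod_eq_zero hmod
  rw [PySem.Int.floordiv_eq_ediv_of_pos hipos]
  constructor
  · rw [Int.le_ediv_iff_mul_le hipos]
    omega
  · exact Int.mul_ediv_cancel' hdvd

-- one divisor's loop body of A equals one divisor's extension of B, folded into the set
lemma step_core (d start end_ i : Int) (h2 : 2 ≤ i) (hid : i ≤ d)
    (hmod : PySem.Int.mod d i = 0) (s : PySem.Set Int) :
    symWhile i (PySem.Int.floordiv d i) start end_
      (PySem.Int.floordiv start (10 ^ (d - PySem.Int.floordiv d i).toNat))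
      (make_num (PySem.Int.floordiv start (10 ^ (d - PySem.Int.floordiv d i).toNat)) i
        (PySem.Int.floordiv d i)) s
    = ((PySem.List.pyRange
          (max (PySem.Int.floordiv start (10 ^ (d - PySem.Int.floordiv d i).toNat))
               (-(PySem.Int.floordiv (-start)
                   (PySem.Int.floordiv (10 ^ d.toNat - 1) (10 ^ (PySem.Int.floordiv d i).toNat - 1)))))
          (min (10 ^ (PySem.Int.floordiv d i + 1).toNat - 1)
               (PySem.Int.floordiv end_
                   (PySem.Int.floordiv (10 ^ d.toNat - 1) (10 ^ (PySem.Int.floordiv d i).toNat - 1))) + 1) 1).map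
        (fun sec => sec * (PySem.Int.floordiv (10 ^ d.toNat - 1) (10 ^ (PySem.Int.floordiv d i).toNat - 1)))).foldl
      PySem.Set.add s := by
  obtain ⟨hw1, hiw⟩ := divisor_facts d i h2 hid hmod
  set w : Int := PySem.Int.floordiv d i with hw
  set R : Int := PySem.Int.floordiv (10 ^ d.toNat - 1) (10 ^ w.toNat - 1) with hR
  have hrep : R = ((List.range i.toNat).map (fun k => ((10:Int) ^ w.toNat) ^ k)).sum :=
    rep_eq d w i hw1 h2 hiw
  have hRpos : 0 < R := by
    rw [hrep]
    exact rep_pos i.toNat _ (one_le_pow₀ (by norm_num)) (by omega)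
  have hmk : ∀ p : Int, make_num p i w = p * R := by
    intro p
    rw [make_num_eq p i w (by omega), hrep]
  exact symWhile_spec i w start end_ R hRpos hmk _ _ s rfl

lemma mem_foldl_add (l : List Int) : ∀ (s : PySem.Set Int) (x : Int),
    (x ∈ l.foldl PySem.Set.add s) ↔ x ∈ s ∨ x ∈ l := by
  induction l with
  | nil => simp
  | cons y t ih =>
    intro s x
    simp only [List.foldl_cons, ih, PySem.Set.mem_add, List.mem_cons]
    tauto

-- B's arithmetic membership test is membership in the divisor's emitted list
lemma test_entry (R lo hi x : Int) (hR : 0 < R) :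
    ((decide (PySem.Int.mod x R = 0) && decide (lo ≤ PySem.Int.floordiv x R) &&
      decide (PySem.Int.floordiv x R ≤ hi)) = true)
    ↔ x ∈ (PySem.List.pyRange lo (hi + 1) 1).map (fun sec => sec * R) := by
  rw [PySem.Int.mod_eq_emod_of_pos hR, PySem.Int.floordiv_eq_ediv_of_pos hR]
  simp only [Bool.and_eq_true, decide_eq_true_eq, List.mem_map, PySem.List.mem_pyRange_one]
  constructor
  · rintro ⟨⟨hm, hlo⟩, hhi⟩
    have hdvd : R ∣ x := Int.dvd_of_emod_eq_zero hm
    exact ⟨x / R, ⟨hlo, by omega⟩, Int.ediv_mul_cancel hdvd⟩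
  · rintro ⟨sec, ⟨hlo, hhi⟩, rfl⟩
    have hdiv : sec * R / R = sec := Int.mul_ediv_cancel sec (by omega)
    refine ⟨⟨?_, by omega⟩, by omega⟩
    simp [Int.mul_emod_left]

-- B's inner loop sums exactly the new elements A's set gains
lemma sum_inner_loop (R : Int) (hR : 0 < R) (test : Int → Bool) (s0 : PySem.Set Int)
    (htest : ∀ x : Int, test x = true ↔ x ∈ s0) :
    ∀ (n : Nat) (a b : Int), (b - a).toNat = n → ∀ (extra : List Int),
      (∀ y ∈ extra, ∃ sec : Int, y = sec * R ∧ sec < a) →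
      (((PySem.List.pyRange a b 1).map (fun sec => sec * R)).foldl PySem.Set.add
          (s0 ++ extra)).sum
        = (PySem.List.pyRange a b 1).foldl
            (fun t sec => if !(test (sec * R)) then t + sec * R else t) ((s0 ++ extra).sum) := by
  intro n
  induction n with
  | zero =>
    intro a b hn extra hextra
    rw [PySem.List.pyRange_one_eq_nil (by omega)]
    simp
  | succ n ih =>
    intro a b hn extra hextra
    rw [PySem.List.pyRange_one_cons (by omega)]
    simp only [List.map_cons, List.foldl_cons]
    by_cases ht : test (a * R)
    · rw [PySem.Set.add_of_mem (by
        have := (htest (a * R)).mp ht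
        exact List.mem_append_left _ this)]
      rw [ht]
      simp only [Bool.not_true, Bool.false_eq_true, if_false]
      exact ih (a + 1) b (by omega) extra
        (fun y hy => by
          obtain ⟨sec, h1, h2⟩ := hextra y hy
          exact ⟨sec, h1, by omega⟩)
    · have hnots0 : a * R ∉ s0 := fun h => ht ((htest _).mpr h)
      have hnotex : a * R ∉ extra := by
        intro h
        obtain ⟨sec, h1, h2⟩ := hextra _ h
        have : sec * R < a * R := mul_lt_mul_of_pos_right h2 hR
        omega
      rw [PySem.Set.add_of_not_mem (by
        intro h
        rcases List.mem_append.mp h with h | h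
        · exact hnots0 h
        · exact hnotex h)]
      rw [eq_false_of_ne_true ht]
      simp only [Bool.not_false, if_true]
      have hassoc : (s0 ++ extra) ++ [a * R] = s0 ++ (extra ++ [a * R]) :=
        List.append_assoc ..
      have hsum : (s0 ++ (extra ++ [a * R])).sum = (s0 ++ extra).sum + a * R := by
        simp [List.sum_append]
        omega
      rw [hassoc, ← hsum]
      exact ih (a + 1) b (by omega) (extra ++ [a * R])
        (fun y hy => by
          rcases List.mem_append.mp hy with h | h
          · obtain ⟨sec, h1, h2⟩ := hextra y h
            exact ⟨sec, h1, by omega⟩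
          · simp only [List.mem_singleton] at h
            exact ⟨a, h, by omega⟩)

lemma rep_pos' (d i : Int) (h2 : 2 ≤ i) (hid : i ≤ d) (hmod : PySem.Int.mod d i = 0) :
    0 < PySem.Int.floordiv (10 ^ d.toNat - 1) (10 ^ (PySem.Int.floordiv d i).toNat - 1) := by
  obtain ⟨hw1, hiw⟩ := divisor_facts d i h2 hid hmod
  rw [rep_eq d (PySem.Int.floordiv d i) i hw1 h2 hiw]
  exact rep_pos i.toNat _ (one_le_pow₀ (by norm_num)) (by omega)

lemma outer_fold (d start end_ : Int) :
    ∀ (l : List Int), (∀ i ∈ l, 2 ≤ i ∧ i < d + 1) →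
    ∀ (s : PySem.Set Int) (t : Int) (prev : List (Int × Int × Int)),
    t = s.sum →
    (∀ x : Int, (prev.any (fun p => decide (PySem.Int.mod x p.1 = 0) &&
        decide (p.2.1 ≤ PySem.Int.floordiv x p.1) &&
        decide (PySem.Int.floordiv x p.1 ≤ p.2.2))) = true ↔ x ∈ s) →
    (List.foldl (fun s i =>
      if PySem.Int.mod d i = 0 then
        symWhile i (PySem.Int.floordiv d i) start end_
          (PySem.Int.floordiv start (10 ^ (d - PySem.Int.floordiv d i).toNat))
          (make_num (PySem.Int.floordiv start (10 ^ (d - PySem.Int.floordiv d i).toNat)) i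
            (PySem.Int.floordiv d i)) s
      else s) s l).sum
    = (List.foldl (fun st i =>
        if PySem.Int.mod d i = 0 then
          ((PySem.List.pyRange
              (max (PySem.Int.floordiv start (10 ^ (d - PySem.Int.floordiv d i).toNat))
                   (-(PySem.Int.floordiv (-start)
                       (PySem.Int.floordiv (10 ^ d.toNat - 1) (10 ^ (PySem.Int.floordiv d i).toNat - 1)))))
              (min (10 ^ (PySem.Int.floordiv d i + 1).toNat - 1)
                   (PySem.Int.floordiv end_
                       (PySem.Int.floordiv (10 ^ d.toNat - 1) (10 ^ (PySem.Int.floordiv d i).toNat - 1))) + 1) 1).foldl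
            (fun t sec =>
              if !(st.2.any (fun p =>
                    decide (PySem.Int.mod (sec * (PySem.Int.floordiv (10 ^ d.toNat - 1) (10 ^ (PySem.Int.floordiv d i).toNat - 1))) p.1 = 0) &&
                    decide (p.2.1 ≤ PySem.Int.floordiv (sec * (PySem.Int.floordiv (10 ^ d.toNat - 1) (10 ^ (PySem.Int.floordiv d i).toNat - 1))) p.1) &&
                    decide (PySem.Int.floordiv (sec * (PySem.Int.floordiv (10 ^ d.toNat - 1) (10 ^ (PySem.Int.floordiv d i).toNat - 1))) p.1 ≤ p.2.2)))
              then t + sec * (PySem.Int.floordiv (10 ^ d.toNat - 1) (10 ^ (PySem.Int.floordiv d i).toNat - 1)) else t) st.1,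
           st.2 ++ [(PySem.Int.floordiv (10 ^ d.toNat - 1) (10 ^ (PySem.Int.floordiv d i).toNat - 1),
             max (PySem.Int.floordiv start (10 ^ (d - PySem.Int.floordiv d i).toNat))
                 (-(PySem.Int.floordiv (-start)
                     (PySem.Int.floordiv (10 ^ d.toNat - 1) (10 ^ (PySem.Int.floordiv d i).toNat - 1)))),
             min (10 ^ (PySem.Int.floordiv d i + 1).toNat - 1)
                 (PySem.Int.floordiv end_
                     (PySem.Int.floordiv (10 ^ d.toNat - 1) (10 ^ (PySem.Int.floordiv d i).toNat - 1))))])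
        else st) (t, prev) l).1 := by
  intro l
  induction l with
  | nil =>
    intro _ s t prev ht _
    exact ht.symm
  | cons i tl ih =>
    intro hmem s t prev ht htest
    have hi := hmem i (List.mem_cons_self ..)
    simp only [List.foldl_cons]
    by_cases hm : PySem.Int.mod d i = 0
    · rw [if_pos hm, if_pos hm]
      set R : Int := PySem.Int.floordiv (10 ^ d.toNat - 1) (10 ^ (PySem.Int.floordiv d i).toNat - 1) with hRdef
      set lo : Int := max (PySem.Int.floordiv start (10 ^ (d - PySem.Int.floordiv d i).toNat))
          (-(PySem.Int.floordiv (-start) R)) with hlodef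
      set hi' : Int := min (10 ^ (PySem.Int.floordiv d i + 1).toNat - 1)
          (PySem.Int.floordiv end_ R) with hhidef
      have hR : 0 < R := rep_pos' d i hi.1 (by omega) hm
      have hstep := step_core d start end_ i hi.1 (by omega) hm s
      rw [hstep]
      have hinner := sum_inner_loop R hR
        (fun x => prev.any (fun p => decide (PySem.Int.mod x p.1 = 0) &&
          decide (p.2.1 ≤ PySem.Int.floordiv x p.1) &&
          decide (PySem.Int.floordiv x p.1 ≤ p.2.2))) s htest
        (hi' + 1 - lo).toNat lo (hi' + 1) rfl [] (by simp)
      simp only [List.append_nil] at hinner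
      rw [← ht] at hinner
      have hinv : ∀ x : Int,
          (((prev ++ [(R, lo, hi')]).any (fun p => decide (PySem.Int.mod x p.1 = 0) &&
              decide (p.2.1 ≤ PySem.Int.floordiv x p.1) &&
              decide (PySem.Int.floordiv x p.1 ≤ p.2.2))) = true
            ↔ x ∈ (((PySem.List.pyRange lo (hi' + 1) 1).map (fun sec => sec * R)).foldl
                PySem.Set.add s)) := by
        intro x
        rw [mem_foldl_add]
        rw [← test_entry R lo hi' x hR]
        simp only [List.any_append, List.any_cons, List.any_nil, Bool.or_false,
          Bool.or_eq_true, htest]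
      exact ih (fun j hj => hmem j (List.mem_cons_of_mem _ hj)) _ _ _ hinner.symm hinv
    · rw [if_neg hm, if_neg hm]
      exact ih (fun j hj => hmem j (List.mem_cons_of_mem _ hj)) s t prev ht htest

theorem sym_in_range_eq_alt (d start end_ : Int) :
    sym_in_range d start end_ = sym_in_range_alt d start end_ := by
  refine outer_fold d start end_ (PySem.List.pyRange 2 (d + 1) 1)
    (fun i hi => by
      have := (PySem.List.mem_pyRange_one (a := 2) (b := d + 1) (x := i)).mp hi
      exact ⟨this.1, this.2⟩)
    PySem.Set.empty 0 [] rfl (by simp)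

-- ===== VERDICT (by name: the statement is the Claim_ definition above) =====
theorem sym_in_range_spec : Claim_equal_sym_in_range := by
  intro digits start end_ _
  exact sym_in_range_eq_alt digits start end_
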